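-- pv_equiv track=rewrite | github.com/etelford32/Clstl_Smltr | upgrade_nav.py | find_nav_block
-- ===== SOURCE A (Python) =====
-- def find_nav_block(html):
--     start = html.find('<nav>')
--     if start == -1: start = html.find('<nav ')
--     if start == -1: return None, None
--     depth, i = 0, start
--     while i < len(html):
--         if   html[i:i+4] == '<nav': depth += 1; i += 4
--         elif html[i:i+6] == '</nav>':
--             depth -= 1
--             if depth == 0: return start, i + 6
--             i += 6
--         else: i += 1
--     return None, None
-- ===== SOURCE B (Python) =====
-- def find_nav_block(html):
--     start = html.find('<nav>')
--     if start == -1: start = html.find('<nav ')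
--     if start == -1: return None, None
--     # phase 1: token stream of all '</nav>' / '<nav' occurrences from start on,
--     # located by find-jumps instead of sliding a window one character at a time
--     tokens = []
--     i = start
--     while True:
--         c = html.find('</nav>', i)
--         o = html.find('<nav', i)
--         if c == -1 and o == -1: break
--         if c != -1 and (o == -1 or c < o):
--             tokens.append((c, True)); i = c + 6
--         else:
--             tokens.append((o, False)); i = o + 4
--     # phase 2: depth fold over the token stream
--     depth = 0
--     for p, is_close in tokens:
--         if is_close:
--             depth -= 1
--             if depth == 0: return start, p + 6
--         else:
--             depth += 1
--     return None, None
-- ===== Notes on version B (the rewrite author's own statement) =====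
-- stated objective: alternative
-- what changed: A slides a window one character at a time comparing 4- and 6-character slices at every index; B first collects the stream of nav open/close tag tokens by jumping between str.find hits and then folds a depth counter over that token list.
import Mathlib
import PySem

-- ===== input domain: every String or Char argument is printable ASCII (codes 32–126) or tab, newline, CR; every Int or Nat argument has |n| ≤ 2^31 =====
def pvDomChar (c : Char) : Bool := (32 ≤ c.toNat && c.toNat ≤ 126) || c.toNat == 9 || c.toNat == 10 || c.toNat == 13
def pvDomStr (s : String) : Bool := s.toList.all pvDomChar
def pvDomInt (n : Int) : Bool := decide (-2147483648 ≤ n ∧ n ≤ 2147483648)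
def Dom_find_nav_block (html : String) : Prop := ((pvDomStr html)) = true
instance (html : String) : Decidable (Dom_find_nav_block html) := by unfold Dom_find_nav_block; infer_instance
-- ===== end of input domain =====

-- B replaces A's one-character sliding-window scan by a two-phase form: collect the
-- '</nav>'/'<nav' token stream with find-jumps, then fold a depth counter over it
-- (alternative decomposition, same return value).

-- ===== PORT A =====
def navOpn : List Char := ['<', 'n', 'a', 'v']
def navCls : List Char := ['<', '/', 'n', 'a', 'v', '>']

-- A's while-loop; the slice html[i:i+4] with 0 ≤ i is exactly (l.drop i).take 4
def aLoop (l : List Char) (start : Nat) (depth : Int) (i : Nat) : Option Int × Option Int :=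
  if _h : i < l.length then
    if (l.drop i).take 4 = navOpn then aLoop l start (depth + 1) (i + 4)
    else if (l.drop i).take 6 = navCls then
      if depth - 1 = 0 then (some (start : Int), some ((i : Int) + 6))
      else aLoop l start (depth - 1) (i + 6)
    else aLoop l start depth (i + 1)
  else (none, none)
termination_by l.length - i
decreasing_by all_goals omega

def find_nav_block (html : String) : Option Int × Option Int :=
  let l := html.toList
  let s0 := PySem.Chars.find l ['<', 'n', 'a', 'v', '>']
  let start := if s0 = -1 then PySem.Chars.find l ['<', 'n', 'a', 'v', ' '] else s0
  if start = -1 then (none, none)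
  else aLoop l start.toNat 0 start.toNat

-- ===== PORT B =====
-- phase 1 of Source B: the while-True find-jump loop (the fuel only makes it total;
-- each emitted token advances i by at least 4, so fuel l.length + 1 never runs out)
def bTokens (l : List Char) : Nat → Nat → List (Nat × Bool)
  | 0, _ => []
  | fuel + 1, i =>
    let c := PySem.Chars.findFrom l navCls (i : Int) none
    let o := PySem.Chars.findFrom l navOpn (i : Int) none
    if c = -1 ∧ o = -1 then []
    else if c ≠ -1 ∧ (o = -1 ∨ c < o) then (c.toNat, true) :: bTokens l fuel (c.toNat + 6)
    else (o.toNat, false) :: bTokens l fuel (o.toNat + 4)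

-- phase 2 of Source B: the depth fold over the token stream
def bFold (start : Nat) (depth : Int) : List (Nat × Bool) → Option Int × Option Int
  | [] => (none, none)
  | (p, isClose) :: rest =>
    if isClose then
      if depth - 1 = 0 then (some (start : Int), some ((p : Int) + 6))
      else bFold start (depth - 1) rest
    else bFold start (depth + 1) rest

def find_nav_block_alt (html : String) : Option Int × Option Int :=
  let l := html.toList
  let s0 := PySem.Chars.find l ['<', 'n', 'a', 'v', '>']
  let start := if s0 = -1 then PySem.Chars.find l ['<', 'n', 'a', 'v', ' '] else s0
  if start = -1 then (none, none)
  else bFold start.toNat 0 (bTokens l (l.length + 1) start.toNat)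

-- ===== PRECONDITION & SPEC =====
def Spec_find_nav_block (html : String) (out : Option Int × Option Int) : Prop := out = find_nav_block_alt html
instance (html : String) (out : Option Int × Option Int) : Decidable (Spec_find_nav_block html out) := by unfold Spec_find_nav_block; infer_instance

-- ===== CLAIM (what is proved, stated in full; the proofs are below) =====
def Claim_equal_find_nav_block : Prop := ∀ (html : String), Dom_find_nav_block html → Spec_find_nav_block html (find_nav_block html)

-- ===== LEMMAS AND PROOFS =====

-- the two patterns cannot both match at the same position
theorem not_both_nav (d : List Char) (hc : navCls <+: d) (ho : navOpn <+: d) : False := by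
  obtain ⟨t1, h1⟩ := hc
  obtain ⟨t2, h2⟩ := ho
  simp only [navCls, navOpn] at h1 h2
  rw [← h1] at h2
  simp at h2

-- prefix-at-i vs A's slice test
theorem take_iff_prefix (l : List Char) (i : Nat) :
    ((l.drop i).take 4 = navOpn ↔ navOpn <+: l.drop i)
    ∧ ((l.drop i).take 6 = navCls ↔ navCls <+: l.drop i) := by
  constructor
  · rw [List.prefix_iff_eq_take]; simp [navOpn, eq_comm]
  · rw [List.prefix_iff_eq_take]; simp [navCls, eq_comm]

-- findFrom at a position where the pattern matches returns that position
theorem findFrom_self (l sub : List Char) (i : Nat) (hi : i ≤ l.length)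
    (hp : sub <+: l.drop i) : PySem.Chars.findFrom l sub (i : Int) none = i := by
  rw [PySem.Chars.findFrom_natCast l sub i hi]
  have h0 : (0 : Int) ≤ PySem.Chars.find (l.drop i) sub :=
    (PySem.Chars.find_nonneg_iff _ _).mpr hp.isInfix
  obtain ⟨hpre, hmin⟩ := PySem.Chars.find_spec h0
  have hz : (PySem.Chars.find (l.drop i) sub).toNat = 0 := by
    by_contra hne
    exact hmin 0 (by omega) (by simpa using hp)
  have hfind : PySem.Chars.find (l.drop i) sub = 0 := by omega
  simp [hfind]

-- a non-(-1) findFrom result is strictly beyond i when the pattern does not match at i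
theorem findFrom_beyond (l sub : List Char) (i : Nat) (hi : i ≤ l.length)
    (hnp : ¬ sub <+: l.drop i) :
    PySem.Chars.findFrom l sub (i : Int) none = -1 ∨
      (i : Int) < PySem.Chars.findFrom l sub (i : Int) none := by
  rw [PySem.Chars.findFrom_natCast l sub i hi]
  by_cases hg : PySem.Chars.find (l.drop i) sub = -1
  · simp [hg]
  · right
    have hge0 : 0 ≤ PySem.Chars.find (l.drop i) sub := by
      have := PySem.Chars.neg_one_le_find (l.drop i) sub; omega
    obtain ⟨hpre, hmin⟩ := PySem.Chars.find_spec hge0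
    have hne0 : (PySem.Chars.find (l.drop i) sub).toNat ≠ 0 := by
      intro h0; rw [h0] at hpre; simp at hpre; exact hnp hpre
    simp only [hg, if_false]
    omega

-- findFrom skips a position where the pattern does not match
theorem findFrom_shift (l sub : List Char) (i : Nat) (hi : i < l.length)
    (hnp : ¬ sub <+: l.drop i) :
    PySem.Chars.findFrom l sub (i : Int) none = PySem.Chars.findFrom l sub ((i + 1 : Nat) : Int) none := by
  rw [PySem.Chars.findFrom_natCast l sub i (by omega),
      PySem.Chars.findFrom_natCast l sub (i + 1) (by omega)]
  by_cases h1 : PySem.Chars.find (l.drop (i + 1)) sub = -1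
  · have hno : ¬ sub <:+: l.drop (i + 1) := (PySem.Chars.find_eq_neg_one_iff _ _).mp h1
    have h0 : PySem.Chars.find (l.drop i) sub = -1 := by
      rw [PySem.Chars.find_eq_neg_one_iff]
      intro hinf
      obtain ⟨j, hj⟩ := (PySem.Chars.exists_prefix_drop_iff_isIn sub (l.drop i)).mpr
        ((PySem.Chars.isIn_iff_infix _ _).mpr hinf)
      match j, hj with
      | 0, hj => exact hnp (by simpa using hj)
      | j + 1, hj =>
        rw [List.drop_drop] at hj
        have hj' : sub <+: (l.drop (i + 1)).drop j := by
          rw [List.drop_drop]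
          have : i + 1 + j = i + (j + 1) := by omega
          rw [this]; exact hj
        exact hno (hj'.isInfix.trans ((l.drop (i + 1)).drop_suffix j).isInfix)
    simp [h0, h1]
  · have hr0 : 0 ≤ PySem.Chars.find (l.drop (i + 1)) sub := by
      have := PySem.Chars.neg_one_le_find (l.drop (i + 1)) sub; omega
    obtain ⟨hrpre, hrmin⟩ := PySem.Chars.find_spec hr0
    have hinf : sub <:+: l.drop i := by
      have : (l.drop (i + 1)).drop (PySem.Chars.find (l.drop (i + 1)) sub).toNat
          = (l.drop i).drop ((PySem.Chars.find (l.drop (i + 1)) sub).toNat + 1) := by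
        rw [List.drop_drop, List.drop_drop]
        congr 1; omega
      rw [this] at hrpre
      exact hrpre.isInfix.trans ((l.drop i).drop_suffix _).isInfix
    have hf0 : 0 ≤ PySem.Chars.find (l.drop i) sub :=
      (PySem.Chars.find_nonneg_iff _ _).mpr hinf
    obtain ⟨hfpre, hfmin⟩ := PySem.Chars.find_spec hf0
    have hfne0 : (PySem.Chars.find (l.drop i) sub).toNat ≠ 0 := by
      intro h0; rw [h0] at hfpre; simp at hfpre; exact hnp hfpre
    -- f.toNat ≤ r.toNat + 1
    have hle1 : (PySem.Chars.find (l.drop i) sub).toNat ≤ (PySem.Chars.find (l.drop (i + 1)) sub).toNat + 1 := by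
      by_contra hgt
      apply hfmin ((PySem.Chars.find (l.drop (i + 1)) sub).toNat + 1) (by omega)
      have : (l.drop i).drop ((PySem.Chars.find (l.drop (i + 1)) sub).toNat + 1)
          = (l.drop (i + 1)).drop (PySem.Chars.find (l.drop (i + 1)) sub).toNat := by
        rw [List.drop_drop, List.drop_drop]; congr 1; omega
      rw [this]; exact hrpre
    -- r.toNat ≤ f.toNat - 1
    have hle2 : (PySem.Chars.find (l.drop (i + 1)) sub).toNat ≤ (PySem.Chars.find (l.drop i) sub).toNat - 1 := by
      by_contra hgt
      apply hrmin ((PySem.Chars.find (l.drop i) sub).toNat - 1) (by omega)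
      have : (l.drop (i + 1)).drop ((PySem.Chars.find (l.drop i) sub).toNat - 1)
          = (l.drop i).drop (PySem.Chars.find (l.drop i) sub).toNat := by
        rw [List.drop_drop, List.drop_drop]; congr 1; omega
      rw [this]; exact hfpre
    have hfe : PySem.Chars.find (l.drop i) sub = PySem.Chars.find (l.drop (i + 1)) sub + 1 := by omega
    have hf1 : PySem.Chars.find (l.drop i) sub ≠ -1 := by omega
    rw [if_neg hf1, if_neg h1, hfe]
    push_cast
    ring

-- at the end of the string both finds fail and both programs give (none, none)
theorem end_case (l : List Char) (start : Nat) (fuel : Nat) (depth : Int) :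
    bFold start depth (bTokens l fuel l.length) = aLoop l start depth l.length := by
  have ha : aLoop l start depth l.length = (none, none) := by rw [aLoop]; simp
  cases fuel with
  | zero => rw [ha]; rfl
  | succ f =>
    have hend : ∀ sub : List Char, sub ≠ [] →
        PySem.Chars.findFrom l sub (l.length : Int) none = -1 := by
      intro sub hs
      rw [PySem.Chars.findFrom_natCast l sub l.length le_rfl]
      have hnil : PySem.Chars.find ([] : List Char) sub = -1 := by
        rw [PySem.Chars.find_eq_neg_one_iff]
        simp [List.infix_nil, hs]
      simp [List.drop_length, hnil]
    have hc := hend navCls (by simp [navCls])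
    have ho := hend navOpn (by simp [navOpn])
    rw [bTokens]
    simp only [hc, ho, and_self, if_pos]
    rw [ha]; rfl

theorem main_lemma (n : Nat) : ∀ (l : List Char) (start i fuel : Nat) (depth : Int),
    i ≤ l.length → l.length ≤ i + 4 * fuel → l.length - i ≤ n →
    bFold start depth (bTokens l fuel i) = aLoop l start depth i := by
  induction n with
  | zero =>
    intro l start i fuel depth hi hfuel hn
    have : i = l.length := by omega
    subst this
    exact end_case l start fuel depth
  | succ n ih =>
    intro l start i fuel depth hi hfuel hn
    rcases Nat.lt_or_ge i l.length with hlt | hge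
    · obtain ⟨f, rfl⟩ : ∃ f, fuel = f + 1 := ⟨fuel - 1, by omega⟩
      by_cases hcls : navCls <+: l.drop i
      · -- close token at i
        have hno : ¬ navOpn <+: l.drop i := fun h => not_both_nav _ hcls h
        have hc : PySem.Chars.findFrom l navCls (i : Int) none = i :=
          findFrom_self l navCls i (by omega) hcls
        have hlen6 : i + 6 ≤ l.length := by
          have h1 := hcls.length_le
          simp only [navCls, List.length_cons, List.length_nil, List.length_drop] at h1
          omega
        have hoc := findFrom_beyond l navOpn i (by omega) hno
        rw [bTokens]
        simp only [hc]
        have hcne : (i : Int) ≠ -1 := by omega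
        rw [if_neg (by intro h; exact hcne h.1),
            if_pos (And.intro hcne (by rcases hoc with h | h; exact Or.inl h; exact Or.inr h))]
        rw [bFold, aLoop]
        rw [dif_pos hlt, if_neg (fun h => hno ((take_iff_prefix l i).1.mp h)),
            if_pos ((take_iff_prefix l i).2.mpr hcls)]
        simp only [Int.toNat_natCast]
        by_cases hd : depth - 1 = 0
        · simp [hd]
        · simp only [hd, if_true, if_false]
          exact ih l start (i + 6) f (depth - 1) (by omega) (by omega) (by omega)
      · by_cases hopn : navOpn <+: l.drop i
        · -- open token at i
          have ho : PySem.Chars.findFrom l navOpn (i : Int) none = i :=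
            findFrom_self l navOpn i (by omega) hopn
          have hlen4 : i + 4 ≤ l.length := by
            have h1 := hopn.length_le
            simp only [navOpn, List.length_cons, List.length_nil, List.length_drop] at h1
            omega
          have hcc := findFrom_beyond l navCls i (by omega) hcls
          rw [bTokens]
          simp only [ho]
          have hone : (i : Int) ≠ -1 := by omega
          rw [if_neg (by intro h; exact hone h.2),
              if_neg (by
                intro h
                rcases h.2 with h2 | h2
                · exact hone h2
                · rcases hcc with h3 | h3
                  · exact h.1 h3
                  · omega)]
          rw [bFold, aLoop]
          rw [dif_pos hlt, if_pos ((take_iff_prefix l i).1.mpr hopn)]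
          simp only [Int.toNat_natCast, Bool.false_eq_true, if_false]
          exact ih l start (i + 4) f (depth + 1) (by omega) (by omega) (by omega)
        · -- no token at i: both finds skip past i
          have hstep : bTokens l (f + 1) i = bTokens l (f + 1) (i + 1) := by
            rw [bTokens, findFrom_shift l navCls i hlt hcls, findFrom_shift l navOpn i hlt hopn]
            rw [bTokens]
          rw [hstep, aLoop]
          rw [dif_pos hlt, if_neg (fun h => hopn ((take_iff_prefix l i).1.mp h)),
              if_neg (fun h => hcls ((take_iff_prefix l i).2.mp h))]
          exact ih l start (i + 1) (f + 1) depth (by omega) (by omega) (by omega)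
    · have : i = l.length := by omega
      subst this
      exact end_case l start fuel depth
-- ===== VERDICT (by name: the statement is the Claim_ definition above) =====
theorem find_nav_block_spec : Claim_equal_find_nav_block := by
  intro html _
  unfold Spec_find_nav_block find_nav_block find_nav_block_alt
  simp only []
  set l := html.toList with hl
  set s0 := PySem.Chars.find l ['<', 'n', 'a', 'v', '>'] with hs0
  set start := if s0 = -1 then PySem.Chars.find l ['<', 'n', 'a', 'v', ' '] else s0 with hstart
  by_cases h : start = -1
  · rw [if_pos h, if_pos h]
  · rw [if_neg h, if_neg h]
    have hle : start ≤ (l.length : Int) := by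
      have h1 := PySem.Chars.find_le_length l ['<', 'n', 'a', 'v', '>']
      have h2 := PySem.Chars.find_le_length l ['<', 'n', 'a', 'v', ' ']
      rw [hstart]; split_ifs <;> omega
    have htn : start.toNat ≤ l.length := by omega
    exact (main_lemma l.length l start.toNat start.toNat (l.length + 1) 0 htn (by omega) (by omega)).symm
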